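-- pv_equiv track=rewrite | github.com/yangwang201911/Image2DNA | Image2DNA.py | convert_letters_to_rgb
-- ===== SOURCE A (Python) =====
-- def convert_letters_to_rgb(ret):
--     rgb = []
--     for i in range(0, len(ret), 4):
--         c1, c2, c3, c4 = ret[i], ret[i+1], ret[i+2], ret[i+3]
--         binary_str = ''
--         if c1 == 'A':
--             binary_str += '00'
--         elif c1 == 'T':
--             binary_str += '01'
--         elif c1 == 'G':
--             binary_str += '10'
--         else:
--             binary_str += '11'
--
--         if c2 == 'A':
--             binary_str += '00'
--         elif c2 == 'T':
--             binary_str += '01'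
--         elif c2 == 'G':
--             binary_str += '10'
--         else:
--             binary_str += '11'
--
--         if c3 == 'A':
--             binary_str += '00'
--         elif c3 == 'T':
--             binary_str += '01'
--         elif c3 == 'G':
--             binary_str += '10'
--         else:
--             binary_str += '11'
--
--         if c4 == 'A':
--             binary_str += '00'
--         elif c4 == 'T':
--             binary_str += '01'
--         elif c4 == 'G':
--             binary_str += '10'
--         else:
--             binary_str += '11'
--         rgb.append(int(binary_str, 2))
--     return rgb
-- ===== SOURCE B (Python) =====
-- def convert_letters_to_rgb(ret):
--     table = {'A': 0, 'T': 1, 'G': 2}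
--     digits = [table.get(c, 3) for c in ret]
--     rgb = []
--     for i in range(0, len(digits), 4):
--         rgb.append(digits[i] * 64 + digits[i+1] * 16 + digits[i+2] * 4 + digits[i+3])
--     return rgb
-- ===== Notes on version B (the rewrite author's own statement) =====
-- stated objective: simpler
-- what changed: One table-lookup pass maps every letter to its 2-bit value, then a second pass packs each group of four digits into a byte arithmetically (d1*64+d2*16+d3*4+d4), replacing the fused per-group if-chains that build a binary string and re-parse it with int(s,2).
import Mathlib
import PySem

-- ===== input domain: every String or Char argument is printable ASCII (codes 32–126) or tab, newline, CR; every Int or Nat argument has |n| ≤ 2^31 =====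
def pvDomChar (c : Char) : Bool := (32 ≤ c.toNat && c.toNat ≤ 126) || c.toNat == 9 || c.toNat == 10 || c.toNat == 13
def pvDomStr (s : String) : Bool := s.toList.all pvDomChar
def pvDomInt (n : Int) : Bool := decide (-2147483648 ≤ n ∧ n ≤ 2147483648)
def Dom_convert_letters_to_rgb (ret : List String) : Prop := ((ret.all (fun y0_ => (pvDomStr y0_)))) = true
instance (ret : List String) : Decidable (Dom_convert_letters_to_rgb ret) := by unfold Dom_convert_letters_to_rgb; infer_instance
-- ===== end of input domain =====

-- B replaces A's per-group if-chains (building a binary string and re-parsing it with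
-- int(s, 2)) by one table-lookup pass to 2-bit digits followed by arithmetic packing.

-- ===== PORT A =====
-- loop body of A: pick the four letters, build the binary string by the if/elif chains,
-- append int(binary_str, 2)
def pvStepA (ret : List String) (rgb : List Int) (i : Int) : List Int :=
  let c1 := PySem.List.pyGetD ret i ""
  let c2 := PySem.List.pyGetD ret (i+1) ""
  let c3 := PySem.List.pyGetD ret (i+2) ""
  let c4 := PySem.List.pyGetD ret (i+3) ""
  let binary_str :=
    (if c1 = "A" then "00" else if c1 = "T" then "01" else if c1 = "G" then "10" else "11") ++
    (if c2 = "A" then "00" else if c2 = "T" then "01" else if c2 = "G" then "10" else "11") ++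
    (if c3 = "A" then "00" else if c3 = "T" then "01" else if c3 = "G" then "10" else "11") ++
    (if c4 = "A" then "00" else if c4 = "T" then "01" else if c4 = "G" then "10" else "11")
  rgb ++ [(PySem.Int.ofStrBase? binary_str 2).getD 0]

def convert_letters_to_rgb (ret : List String) : List Int :=
  (PySem.List.pyRange 0 (ret.length : Int) 4).foldl (pvStepA ret) []

-- ===== PORT B =====
def pvTableB : PySem.Dict String Int := PySem.Dict.ofList [("A", 0), ("T", 1), ("G", 2)]

def convert_letters_to_rgb_alt (ret : List String) : List Int :=
  let digits := ret.map (fun c => pvTableB.getD c 3)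
  (PySem.List.pyRange 0 (digits.length : Int) 4).foldl (fun rgb i =>
    rgb ++ [PySem.List.pyGetD digits i 0 * 64 + PySem.List.pyGetD digits (i+1) 0 * 16 +
            PySem.List.pyGetD digits (i+2) 0 * 4 + PySem.List.pyGetD digits (i+3) 0]) []

-- ===== PRECONDITION & SPEC =====
-- A raises IndexError (ret[i+1]/[i+2]/[i+3]) whenever len(ret) is not a multiple of 4.
def Pre_convert_letters_to_rgb (ret : List String) : Prop := ret.length % 4 = 0
instance (ret : List String) : Decidable (Pre_convert_letters_to_rgb ret) := by
  unfold Pre_convert_letters_to_rgb; infer_instance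

def pvWitness_convert_letters_to_rgb : List String := ["A", "T", "G", "C"]

def Spec_convert_letters_to_rgb (ret : List String) (out : List Int) : Prop :=
  out = convert_letters_to_rgb_alt ret
instance (ret : List String) (out : List Int) : Decidable (Spec_convert_letters_to_rgb ret out) := by
  unfold Spec_convert_letters_to_rgb; infer_instance

-- ===== CLAIM (what is proved, stated in full; the proofs are below) =====
def Claim_equal_convert_letters_to_rgb : Prop :=
  ∀ (ret : List String), Dom_convert_letters_to_rgb ret → Pre_convert_letters_to_rgb ret →
    Spec_convert_letters_to_rgb ret (convert_letters_to_rgb ret)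

-- ===== LEMMAS AND PROOFS =====

-- B's table lookup as an if-chain
lemma pvTableB_getD (c : String) :
    pvTableB.getD c 3 = if c = "A" then 0 else if c = "T" then 1 else if c = "G" then 2 else 3 := by
  have hmk : pvTableB = PySem.Dict.mk [("A", 0), ("T", 1), ("G", 2)] := by decide
  rw [hmk]
  simp only [PySem.Dict.getD_eq_get?_getD, PySem.Dict.get?_mk_cons, beq_iff_eq]
  by_cases h1 : c = "A" <;> by_cases h2 : c = "T" <;> by_cases h3 : c = "G" <;>
    simp_all [PySem.Dict.get?, eq_comm]

set_option maxHeartbeats 2000000 in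
-- packing the four 2-bit digits: A's string-build-and-parse equals B's arithmetic form
lemma pvPack_eq (c1 c2 c3 c4 : String) :
    (PySem.Int.ofStrBase?
      ((if c1 = "A" then "00" else if c1 = "T" then "01" else if c1 = "G" then "10" else "11") ++
       (if c2 = "A" then "00" else if c2 = "T" then "01" else if c2 = "G" then "10" else "11") ++
       (if c3 = "A" then "00" else if c3 = "T" then "01" else if c3 = "G" then "10" else "11") ++
       (if c4 = "A" then "00" else if c4 = "T" then "01" else if c4 = "G" then "10" else "11")) 2).getD 0
    = pvTableB.getD c1 3 * 64 + pvTableB.getD c2 3 * 16 + pvTableB.getD c3 3 * 4 + pvTableB.getD c4 3 := by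
  rw [pvTableB_getD, pvTableB_getD, pvTableB_getD, pvTableB_getD]
  split_ifs <;> decide

-- ===== VERDICT (by name: the statement is the Claim_ definition above) =====

theorem convert_letters_to_rgb_spec : Claim_equal_convert_letters_to_rgb := by
  intro ret _ hpre
  unfold Spec_convert_letters_to_rgb convert_letters_to_rgb convert_letters_to_rgb_alt
  simp only [List.length_map]
  apply PySem.List.foldl_congr_mem
  intro acc i hi
  obtain ⟨h0, hlt, hdvd⟩ :=
    ((PySem.List.mem_pyRange_iff_of_pos (a := 0) (b := (ret.length : Int)) (s := 4)
      (by norm_num)) i).1 hi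
  have hlen : ret.length % 4 = 0 := hpre
  have h3 : i + 3 < (ret.length : Int) := by omega
  have hget : ∀ j : Int, 0 ≤ j → j < (ret.length : Int) →
      PySem.List.pyGetD (ret.map (fun c => pvTableB.getD c 3)) j 0 =
      pvTableB.getD (PySem.List.pyGetD ret j "") 3 := by
    intro j hj0 hjlt
    rw [PySem.List.pyGetD_eq_getElem _ _ hj0 (by simpa using hjlt),
        PySem.List.pyGetD_eq_getElem _ _ hj0 hjlt]
    simp
  rw [hget i h0 (by omega), hget (i+1) (by omega) (by omega),
      hget (i+2) (by omega) (by omega), hget (i+3) (by omega) (by omega)]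
  simp only [pvStepA]
  rw [pvPack_eq]
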